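-- pv_equiv track=rewrite | github.com/monkeyman51/VSE_PipeCleaner_2 | pipe_cleaner/src/dashboard_main_setup.py | get_machine_issues
-- ===== SOURCE A (Python) =====
-- def get_machine_issues(all_machines_in_pipes: list, issues_dict: dict):
--     """
--
--     :param issues_dict:
--     :param all_machines_in_pipes:
--     :return:
--     """
--     all_unique_machines: dict = {}
--     unique_machines = sorted(list(set(all_machines_in_pipes)))
--     for machine_name in unique_machines:
--         all_unique_machines[machine_name] = []
--
--     for unique_machine in unique_machines:
--         for machine_name in issues_dict:
--             if unique_machine in machine_name:
--                 all_unique_machines.get(unique_machine, []).append(machine_name)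
--     return all_unique_machines
-- ===== SOURCE B (Python) =====
-- def get_machine_issues(all_machines_in_pipes: list, issues_dict: dict):
--     """Trie-based multi-pattern substring matching: the unique machine names are
--     inserted into a character trie once; each issue key is then scanned position
--     by position, walking the trie to collect every machine occurring in it, so
--     the per-machine substring loop of A disappears."""
--     machines = sorted(set(all_machines_in_pipes))
--     trie = {}
--     for idx, machine in enumerate(machines):
--         node = trie
--         for ch in machine:
--             node = node.setdefault(ch, {})
--         node[None] = idx
--     buckets = [[] for _ in machines]
--     for key in issues_dict:
--         matched = set()
--         for start in range(len(key) + 1):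
--             node = trie
--             if None in node:
--                 matched.add(node[None])
--             for ch in key[start:]:
--                 if ch not in node:
--                     break
--                 node = node[ch]
--                 if None in node:
--                     matched.add(node[None])
--         for idx in sorted(matched):
--             buckets[idx].append(key)
--     return {machine: bucket for machine, bucket in zip(machines, buckets)}
-- ===== Notes on version B (the rewrite author's own statement) =====
-- stated objective: alternative
-- what changed: B builds a character trie of the unique machine names once and finds, for each issue key, every machine contained in it by walking the trie from each start position (multi-pattern matching), instead of A's loop that runs a separate substring test over the whole issue-key collection for every single machine; the per-machine scan is replaced by trie walks whose cost does not depend on the number of machines.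
import Mathlib
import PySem

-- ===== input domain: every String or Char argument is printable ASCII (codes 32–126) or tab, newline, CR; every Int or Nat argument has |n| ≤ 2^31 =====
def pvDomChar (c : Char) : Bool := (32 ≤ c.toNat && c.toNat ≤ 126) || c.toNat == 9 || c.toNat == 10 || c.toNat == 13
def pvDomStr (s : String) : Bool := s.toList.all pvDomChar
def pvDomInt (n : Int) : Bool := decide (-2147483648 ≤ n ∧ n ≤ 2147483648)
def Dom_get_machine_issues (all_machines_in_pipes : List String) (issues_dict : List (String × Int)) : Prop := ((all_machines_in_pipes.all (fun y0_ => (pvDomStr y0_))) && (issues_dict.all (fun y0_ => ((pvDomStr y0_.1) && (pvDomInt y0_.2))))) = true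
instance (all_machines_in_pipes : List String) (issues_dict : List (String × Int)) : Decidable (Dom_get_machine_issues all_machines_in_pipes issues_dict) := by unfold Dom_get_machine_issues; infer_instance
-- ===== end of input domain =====

-- B replaces A's per-machine rescans of the issue keys by trie-based multi-pattern
-- matching: the machine names go into a character trie once and each issue key is
-- scanned by walking the trie (a different algorithm; no speed is claimed here).

-- ===== PORT A =====
def get_machine_issues (all_machines_in_pipes : List String) (issues_dict : List (String × Int)) : List (String × List String) :=
  let unique_machines := PySem.List.sorted (PySem.Set.ofList all_machines_in_pipes) (fun x => x) false
  let all_unique_machines : PySem.Dict String (List String) :=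
    unique_machines.foldl (fun d machine_name => d.insert machine_name []) PySem.Dict.empty
  let result := unique_machines.foldl (fun d unique_machine =>
      ((PySem.Dict.ofList issues_dict).keys).foldl (fun d machine_name =>
        if PySem.Str.isIn unique_machine machine_name then
          -- `.get(unique_machine, []).append(machine_name)` mutates the stored list; the
          -- key is always present here (inserted in the first loop), so this is exactly modify
          d.modify unique_machine [] (· ++ [machine_name])
        else d) d) all_unique_machines
  result.items

-- ===== PORT B =====
-- the trie (dict-of-dicts) of Source B: each node holds an optional terminal machine
-- index and its labeled children in insertion order (a mutual pair, not a nested inductive)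
mutual
inductive PvTrie where
  | node : Option Nat → PvChildren → PvTrie
inductive PvChildren where
  | nil : PvChildren
  | cons : Char → PvTrie → PvChildren → PvChildren
end

def pvEmptyTrie : PvTrie := .node none .nil

def pvChildLookup : PvChildren → Char → Option PvTrie
  | .nil, _ => none
  | .cons c t rest, c' => if c' = c then some t else pvChildLookup rest c'

-- replace the child at c (keeping its position) or append a new one: dict assignment
def pvChildSet : PvChildren → Char → PvTrie → PvChildren
  | .nil, c, t => .cons c t .nil
  | .cons c' t' rest, c, t => if c = c' then .cons c' t rest else .cons c' t' (pvChildSet rest c t)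

-- `node = node.setdefault(ch, {})` along the word, then `node[None] = idx`
def pvInsert : PvTrie → List Char → Nat → PvTrie
  | .node _ ch, [], i => .node (some i) ch
  | .node t ch, c :: cs, i =>
      .node t (pvChildSet ch c (pvInsert ((pvChildLookup ch c).getD pvEmptyTrie) cs i))

-- the inner walk of Source B from one start position: collect terminals, stop at a missing child
def pvMatchFrom : PvTrie → List Char → List Nat
  | .node t _, [] => t.toList
  | .node t ch, c :: cs =>
      t.toList ++ (match pvChildLookup ch c with
                   | none => []
                   | some t' => pvMatchFrom t' cs)

-- `for idx, machine in enumerate(machines): …insert…` (enumerate indices are ≥ 0, kept as Nat)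
def pvTrieOf (machines : List String) : PvTrie :=
  (PySem.List.enumerate machines).foldl (fun tr p => pvInsert tr p.2.toList p.1.toNat) pvEmptyTrie

def get_machine_issues_alt (all_machines_in_pipes : List String) (issues_dict : List (String × Int)) : List (String × List String) :=
  let machines := PySem.List.sorted (PySem.Set.ofList all_machines_in_pipes) (fun x => x) false
  let trie := pvTrieOf machines
  let buckets0 := machines.map (fun _ => ([] : List String))
  let buckets := (PySem.Dict.ofList issues_dict).keys.foldl (fun b key =>
      -- matched = set of machine indices found by walking the trie from every start position
      let matched : PySem.Set Nat :=
        (PySem.List.pyRange 0 (PySem.Str.len key + 1) 1).foldl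
          (fun m start => PySem.Set.update m (pvMatchFrom trie (key.toList.drop start.toNat)))
          PySem.Set.empty
      -- for idx in sorted(matched): buckets[idx].append(key)
      (PySem.List.sorted matched (fun x => x) false).foldl
        (fun b i => b.modify i (· ++ [key])) b) buckets0
  -- {machine: bucket for machine, bucket in zip(machines, buckets)}
  ((machines.zip buckets).foldl (fun d p => d.insert p.1 p.2) PySem.Dict.empty).items

-- ===== PRECONDITION & SPEC =====
def Spec_get_machine_issues (all_machines_in_pipes : List String) (issues_dict : List (String × Int)) (out : List (String × List String)) : Prop := out = get_machine_issues_alt all_machines_in_pipes issues_dict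
instance (all_machines_in_pipes : List String) (issues_dict : List (String × Int)) (out : List (String × List String)) : Decidable (Spec_get_machine_issues all_machines_in_pipes issues_dict out) := by unfold Spec_get_machine_issues; infer_instance

-- ===== CLAIM (what is proved, stated in full; the proofs are below) =====
def Claim_equal_get_machine_issues : Prop := ∀ (all_machines_in_pipes : List String) (issues_dict : List (String × Int)), Dom_get_machine_issues all_machines_in_pipes issues_dict → Spec_get_machine_issues all_machines_in_pipes issues_dict (get_machine_issues all_machines_in_pipes issues_dict)

-- ===== LEMMAS AND PROOFS =====

----------------------------------------------------------------
-- A-side: A's dict computes machines.map (fun m => (m, ks.filter (isIn m ·)))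
----------------------------------------------------------------

theorem pv_innerA_getD (m : String) (ks : List String) (d : PySem.Dict String (List String)) (k' : String) :
    (ks.foldl (fun d k => if PySem.Str.isIn m k then d.modify m [] (· ++ [k]) else d) d).getD k' [] =
      if k' = m then d.getD k' [] ++ ks.filter (fun k => PySem.Str.isIn m k) else d.getD k' [] := by
  induction ks generalizing d with
  | nil => simp
  | cons k ks ih =>
    simp only [List.foldl_cons, List.filter_cons]
    by_cases hk : PySem.Str.isIn m k
    · rw [if_pos hk, ih, if_pos hk]
      by_cases hkm : k' = m
      · subst hkm
        rw [if_pos rfl, if_pos rfl, PySem.Dict.getD_modify, if_pos rfl,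
            List.append_assoc, List.singleton_append]
      · rw [if_neg hkm, if_neg hkm, PySem.Dict.getD_modify, if_neg hkm]
    · rw [if_neg hk, ih, if_neg hk]

theorem pv_innerA_keys (m : String) (ks : List String) (d : PySem.Dict String (List String))
    (hm : d.contains m = true) :
    (ks.foldl (fun d k => if PySem.Str.isIn m k then d.modify m [] (· ++ [k]) else d) d).keys = d.keys := by
  induction ks generalizing d with
  | nil => rfl
  | cons k ks ih =>
    simp only [List.foldl_cons]
    by_cases hk : PySem.Str.isIn m k
    · rw [if_pos hk,
          ih _ (by rw [PySem.Dict.contains_modify]; simp),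
          PySem.Dict.keys_modify, PySem.Dict.keys_insert_of_contains _ _ hm]
    · rw [if_neg hk, ih _ hm]

theorem pv_outerA_keys (ms ks : List String) (d : PySem.Dict String (List String))
    (hc : ∀ x ∈ ms, d.contains x = true) :
    (ms.foldl (fun d m => ks.foldl (fun d k => if PySem.Str.isIn m k then d.modify m [] (· ++ [k]) else d) d) d).keys = d.keys := by
  induction ms generalizing d with
  | nil => rfl
  | cons m ms ih =>
    simp only [List.foldl_cons]
    have hm : d.contains m = true := hc m (by simp)
    have hkeys := pv_innerA_keys m ks d hm
    rw [ih, hkeys]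
    intro x hx
    rw [PySem.Dict.contains_iff_mem_keys, hkeys, ← PySem.Dict.contains_iff_mem_keys]
    exact hc x (by simp [hx])

theorem pv_outerA_getD (ms ks : List String) (d : PySem.Dict String (List String))
    (hnd : ms.Nodup) (hc : ∀ x ∈ ms, d.contains x = true) (k' : String) :
    (ms.foldl (fun d m => ks.foldl (fun d k => if PySem.Str.isIn m k then d.modify m [] (· ++ [k]) else d) d) d).getD k' [] =
      if k' ∈ ms then d.getD k' [] ++ ks.filter (fun k => PySem.Str.isIn k' k) else d.getD k' [] := by
  induction ms generalizing d with
  | nil => simp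
  | cons m ms ih =>
    simp only [List.foldl_cons]
    have hm : d.contains m = true := hc m (by simp)
    have hkeys := pv_innerA_keys m ks d hm
    have hc' : ∀ x ∈ ms, (ks.foldl (fun d k => if PySem.Str.isIn m k then d.modify m [] (· ++ [k]) else d) d).contains x = true := by
      intro x hx
      rw [PySem.Dict.contains_iff_mem_keys, hkeys, ← PySem.Dict.contains_iff_mem_keys]
      exact hc x (by simp [hx])
    rw [ih _ hnd.of_cons hc']
    by_cases hkm : k' = m
    · subst hkm
      have hnotin : k' ∉ ms := (List.nodup_cons.mp hnd).1
      rw [if_neg hnotin, pv_innerA_getD, if_pos rfl, if_pos (by simp)]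
    · rw [pv_innerA_getD, if_neg hkm]
      by_cases hin : k' ∈ ms
      · rw [if_pos hin, if_pos (by simp [hin])]
      · rw [if_neg hin, if_neg (by simp [hkm, hin])]

theorem pv_d0_getD (ms : List String) (d : PySem.Dict String (List String))
    (h : ∀ k, d.getD k [] = []) (k : String) :
    (ms.foldl (fun d m => d.insert m []) d).getD k [] = [] := by
  induction ms generalizing d with
  | nil => exact h k
  | cons m ms ih =>
    simp only [List.foldl_cons]
    refine ih _ ?_
    intro k'
    rw [PySem.Dict.getD_insert]
    split_ifs <;> simp [h]

theorem pv_A_eq_canonical (machines ks : List String) (hnd : machines.Nodup) :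
    (machines.foldl (fun d m =>
        ks.foldl (fun d k => if PySem.Str.isIn m k then d.modify m [] (· ++ [k]) else d) d)
      (machines.foldl (fun d machine_name => d.insert machine_name []) PySem.Dict.empty)).items =
      machines.map (fun m => (m, ks.filter (fun k => PySem.Str.isIn m k))) := by
  set d0 := machines.foldl (fun d machine_name => d.insert machine_name ([] : List String)) PySem.Dict.empty with hd0
  have hkeys0 : d0.keys = machines := by
    rw [hd0]
    have := PySem.Dict.keys_foldl_insert machines (fun _ _ => ([] : List String)) PySem.Dict.empty
    rw [this, PySem.Dict.keys_empty, PySem.Set.update_nil_left,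
        PySem.Set.ofList_eq_self_of_nodup machines hnd]
  have hc0 : ∀ x ∈ machines, d0.contains x = true := by
    intro x hx
    rw [PySem.Dict.contains_iff_mem_keys, hkeys0]; exact hx
  have hg0 : ∀ k, d0.getD k [] = [] := by
    intro k; exact pv_d0_getD machines PySem.Dict.empty (by simp) k
  set dA := machines.foldl (fun d m =>
      ks.foldl (fun d k => if PySem.Str.isIn m k then d.modify m [] (· ++ [k]) else d) d) d0 with hdA
  have hkeysA : dA.keys = machines := by
    rw [hdA, pv_outerA_keys machines ks d0 hc0, hkeys0]
  have hitems := PySem.Dict.items_eq_map_keys dA (by rw [hkeysA]; exact hnd) ([] : List String)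
  rw [hitems, hkeysA]
  apply List.map_congr_left
  intro m hm
  rw [hdA, pv_outerA_getD machines ks d0 hnd hc0 m, if_pos hm, hg0]
  simp

----------------------------------------------------------------
-- B-side: trie semantics and the bucket loop
----------------------------------------------------------------

-- word lookup in the trie (proof-only characterisation of the trie contents)
def pvLookupW : PvTrie → List Char → Option Nat
  | .node t _, [] => t
  | .node _ ch, c :: cs =>
    match pvChildLookup ch c with
    | none => none
    | some t' => pvLookupW t' cs

theorem pv_childLookup_childSet (ch : PvChildren) (c c' : Char) (t : PvTrie) :
    pvChildLookup (pvChildSet ch c t) c' = if c' = c then some t else pvChildLookup ch c' := by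
  match ch with
  | .nil => simp only [pvChildSet, pvChildLookup]
  | .cons c0 t0 rest =>
    by_cases h : c = c0
    · subst h
      have hset : pvChildSet (PvChildren.cons c t0 rest) c t = PvChildren.cons c t rest := by
        simp [pvChildSet]
      rw [show pvChildSet (PvChildren.cons c t0 rest) c t = PvChildren.cons c t rest from hset]
      simp only [pvChildLookup]
      by_cases h' : c' = c <;> simp [h']
    · rw [show pvChildSet (PvChildren.cons c0 t0 rest) c t = PvChildren.cons c0 t0 (pvChildSet rest c t) by simp [pvChildSet, h]]
      simp only [pvChildLookup, pv_childLookup_childSet rest c c' t]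
      by_cases h' : c' = c0
      · subst h'
        rw [if_pos rfl, if_neg (by intro hh; exact h hh.symm), if_pos rfl]
      · rw [if_neg h', if_neg h']

theorem pv_lookupW_empty (v : List Char) : pvLookupW pvEmptyTrie v = none := by
  cases v <;> rfl

theorem pv_lookupW_insert (w : List Char) (i : Nat) (tr : PvTrie) (v : List Char) :
    pvLookupW (pvInsert tr w i) v = if v = w then some i else pvLookupW tr v := by
  induction w generalizing tr v with
  | nil =>
    obtain ⟨t, ch⟩ := tr
    cases v with
    | nil => simp [pvInsert, pvLookupW]
    | cons c cs => simp [pvInsert, pvLookupW]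
  | cons c cs ih =>
    obtain ⟨t, ch⟩ := tr
    cases v with
    | nil => simp [pvInsert, pvLookupW]
    | cons c' cs' =>
      simp only [pvInsert, pvLookupW, pv_childLookup_childSet]
      by_cases hc : c' = c
      · subst hc
        simp only [if_pos trivial]
        by_cases hcs : cs' = cs
        · subst hcs
          simp [ih]
        · rw [if_neg (by simp [hcs])]
          cases hcl : pvChildLookup ch c' with
          | none => simp [ih, hcs, pv_lookupW_empty]
          | some t' => simp [ih, hcs]
      · rw [if_neg hc, if_neg (by simp [hc])]

theorem pv_matchFrom_spec (s : List Char) (tr : PvTrie) (i : Nat) :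
    i ∈ pvMatchFrom tr s ↔ ∃ w, w <+: s ∧ pvLookupW tr w = some i := by
  induction s generalizing tr with
  | nil =>
    obtain ⟨t, ch⟩ := tr
    simp only [pvMatchFrom]
    constructor
    · intro h
      exact ⟨[], List.nil_prefix, by cases t <;> simp_all [pvLookupW]⟩
    · rintro ⟨w, hw, hl⟩
      rw [List.prefix_nil] at hw
      subst hw
      simp only [pvLookupW] at hl
      simp [hl]
  | cons c cs ih =>
    obtain ⟨t, ch⟩ := tr
    simp only [pvMatchFrom, List.mem_append]
    constructor
    · intro h
      rcases h with h | h
      · exact ⟨[], List.nil_prefix, by cases t <;> simp_all [pvLookupW]⟩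
      · cases hcl : pvChildLookup ch c with
        | none => rw [hcl] at h; simp at h
        | some t' =>
          rw [hcl] at h
          obtain ⟨w, hw, hl⟩ := (ih t').mp h
          exact ⟨c :: w, List.cons_prefix_cons.mpr ⟨rfl, hw⟩, by simp [pvLookupW, hcl, hl]⟩
    · rintro ⟨w, hw, hl⟩
      cases w with
      | nil =>
        simp only [pvLookupW] at hl
        left; simp [hl]
      | cons c0 w' =>
        obtain ⟨hc0, hw'⟩ := List.cons_prefix_cons.mp hw
        subst hc0
        simp only [pvLookupW] at hl
        cases hcl : pvChildLookup ch c0 with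
        | none => rw [hcl] at hl; simp at hl
        | some t' =>
          rw [hcl] at hl
          right
          exact (ih t').mpr ⟨w', hw', hl⟩


theorem pv_lookupW_build (ps : List (Int × String)) (tr0 : PvTrie) (v : List Char)
    (hnd : (ps.map (fun p => p.2)).Nodup) :
    pvLookupW (ps.foldl (fun tr p => pvInsert tr p.2.toList p.1.toNat) tr0) v =
      match ps.find? (fun p => p.2.toList == v) with
      | some p => some p.1.toNat
      | none => pvLookupW tr0 v := by
  induction ps generalizing tr0 with
  | nil => rfl
  | cons p rest ih =>
    simp only [List.map_cons, List.nodup_cons] at hnd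
    simp only [List.foldl_cons, List.find?_cons]
    by_cases hv : p.2.toList = v
    · have hfind : rest.find? (fun q => q.2.toList == v) = none := by
        rw [List.find?_eq_none]
        intro q hq
        simp only [beq_iff_eq]
        intro hq2
        exact hnd.1 (List.mem_map.mpr ⟨q, hq, String.toList_inj.mp (hq2.trans hv.symm)⟩)
      rw [ih _ hnd.2, hfind]
      simp [pv_lookupW_insert, hv]
    · rw [ih _ hnd.2]
      have hb : (p.2.toList == v) = false := by simp [hv]
      rw [hb]
      cases rest.find? (fun q => q.2.toList == v) with
      | none => rw [pv_lookupW_insert, if_neg (show ¬ v = p.2.toList from fun h => hv h.symm)]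
      | some q => simp

-- what the built trie looks up: exactly the position of v among the machine names
theorem pv_trie_char (machines : List String) (hnd : machines.Nodup) (v : List Char) (i : Nat) :
    pvLookupW ((PySem.List.enumerate machines).foldl
        (fun tr p => pvInsert tr p.2.toList p.1.toNat) pvEmptyTrie) v = some i ↔
      ∃ h : i < machines.length, machines[i].toList = v := by
  rw [pv_lookupW_build _ _ _ (by rw [PySem.List.map_snd_enumerate]; exact hnd)]
  cases hf : (PySem.List.enumerate machines).find? (fun p => p.2.toList == v) with
  | none =>
    rw [pv_lookupW_empty]
    constructor
    · intro h; cases h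
    · rintro ⟨hi, hv⟩
      have hmem : ((i : Int), machines[i]) ∈ PySem.List.enumerate machines := by
        rw [PySem.List.mem_enumerate_iff]
        exact ⟨i, hi, by simp⟩
      have := List.find?_eq_none.mp hf _ hmem
      simp [hv] at this
  | some q =>
    have hq := List.find?_some hf
    have hqmem := List.mem_of_find?_eq_some hf
    rw [PySem.List.mem_enumerate_iff] at hqmem
    obtain ⟨k, hk, hqe⟩ := hqmem
    subst hqe
    simp only [beq_iff_eq] at hq
    have htn : ((0 : Int) + (k : Int)).toNat = k := by omega
    simp only [htn, Option.some.injEq]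
    constructor
    · rintro rfl
      exact ⟨hk, hq⟩
    · rintro ⟨hi, hv⟩
      have : machines[i] = machines[k] := String.toList_inj.mp (hv.trans hq.symm)
      exact (List.Nodup.getElem_inj_iff hnd).mp this.symm

theorem pv_mem_foldl_update {β : Type} (l : List β) (g : β → List Nat) (s : PySem.Set Nat) (y : Nat) :
    y ∈ l.foldl (fun m x => PySem.Set.update m (g x)) s ↔ y ∈ s ∨ ∃ x ∈ l, y ∈ g x := by
  induction l generalizing s with
  | nil => simp
  | cons x l ih =>
    simp only [List.foldl_cons, ih, PySem.Set.mem_update, List.mem_cons]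
    constructor
    · rintro ((h | h) | ⟨x', hx', hy⟩)
      · exact Or.inl h
      · exact Or.inr ⟨x, Or.inl rfl, h⟩
      · exact Or.inr ⟨x', Or.inr hx', hy⟩
    · rintro (h | ⟨x', (rfl | hx'), hy⟩)
      · exact Or.inl (Or.inl h)
      · exact Or.inl (Or.inr hy)
      · exact Or.inr ⟨x', hx', hy⟩

theorem pv_nodup_foldl_update {β : Type} (l : List β) (g : β → List Nat) (s : PySem.Set Nat)
    (h : s.Nodup) : (l.foldl (fun m x => PySem.Set.update m (g x)) s).Nodup := by
  induction l generalizing s with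
  | nil => exact h
  | cons x l ih => exact ih _ (PySem.Set.nodup_update _ _ h)

theorem pv_sorted_eq_filter_range (s : PySem.Set Nat) (hnd : s.Nodup) (n : Nat) (p : Nat → Bool)
    (hmem : ∀ i, i ∈ s ↔ (i < n ∧ p i = true)) :
    PySem.List.sorted s (fun x => x) false = (List.range n).filter p := by
  apply PySem.List.sorted_eq_of_perm_of_pairwise_lt
  · rw [List.perm_ext_iff_of_nodup (List.Nodup.filter _ (List.nodup_range)) hnd]
    intro i
    simp only [List.mem_filter, List.mem_range, hmem]
  · exact List.Pairwise.filter _ (List.pairwise_lt_range)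

theorem pv_foldl_modify_length (idxs : List Nat) (L : List (List String)) (g : List String → List String) :
    (idxs.foldl (fun b i => b.modify i g) L).length = L.length := by
  induction idxs generalizing L with
  | nil => rfl
  | cons i idxs ih => simp [ih, List.length_modify]

theorem pv_foldl_modify_getElem? (idxs : List Nat) (hnd : idxs.Nodup) (L : List (List String))
    (g : List String → List String) (j : Nat) :
    (idxs.foldl (fun b i => b.modify i g) L)[j]? = if j ∈ idxs then L[j]?.map g else L[j]? := by
  induction idxs generalizing L with
  | nil => simp
  | cons i idxs ih =>
    simp only [List.foldl_cons, List.nodup_cons] at *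
    rw [ih hnd.2]
    by_cases hij : j = i
    · subst hij
      rw [if_neg hnd.1, if_pos (by simp), List.getElem?_modify]
      cases L[j]? <;> simp
    · rw [List.getElem?_modify]
      by_cases hj : j ∈ idxs
      · rw [if_pos hj, if_pos (by simp [hj])]
        cases L[j]? <;> simp [Ne.symm hij]
      · rw [if_neg hj, if_neg (by simp [hij, hj])]
        cases L[j]? <;> simp [Ne.symm hij]

theorem pv_matched_mem (machines : List String) (hnd : machines.Nodup) (key : String) (i : Nat) :
    (i ∈ (PySem.List.pyRange 0 (PySem.Str.len key + 1) 1).foldl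
        (fun m start => PySem.Set.update m (pvMatchFrom (pvTrieOf machines) (key.toList.drop start.toNat)))
        PySem.Set.empty)
    ↔ (i < machines.length ∧ PySem.Str.isIn (machines.getD i "") key = true) := by
  rw [pv_mem_foldl_update]
  have hlen : PySem.Str.len key = (key.toList.length : Int) := PySem.Str.len_eq key
  constructor
  · rintro (h | ⟨start, hstart, hmem⟩)
    · cases h
    · obtain ⟨w, hw, hlk⟩ := (pv_matchFrom_spec _ _ _).mp hmem
      obtain ⟨hi, hv⟩ := (pv_trie_char machines hnd w i).mp hlk
      refine ⟨hi, ?_⟩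
      rw [List.getD_eq_getElem machines "" hi, PySem.Str.isIn_eq]
      exact (PySem.Chars.exists_prefix_drop_iff_isIn _ _).mp ⟨start.toNat, hv ▸ hw⟩
  · rintro ⟨hi, hIn⟩
    rw [List.getD_eq_getElem machines "" hi, PySem.Str.isIn_eq] at hIn
    obtain ⟨j, hj⟩ := (PySem.Chars.exists_prefix_drop_iff_isIn _ _).mpr hIn
    right
    refine ⟨((min j key.toList.length : Nat) : Int), ?_, ?_⟩
    · rw [PySem.List.mem_pyRange_one, hlen]
      constructor
      · positivity
      · have : min j key.toList.length ≤ key.toList.length := Nat.min_le_right _ _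
        omega
    · rw [Int.toNat_natCast]
      refine (pv_matchFrom_spec _ _ _).mpr ⟨machines[i].toList, ?_, (pv_trie_char machines hnd _ i).mpr ⟨hi, rfl⟩⟩
      by_cases hle : j ≤ key.toList.length
      · rwa [Nat.min_eq_left hle]
      · rw [Nat.min_eq_right (by omega)]
        rw [List.drop_eq_nil_of_le (by omega)] at hj
        rw [List.drop_eq_nil_of_le (by omega)]
        exact hj

theorem pv_step_getElem? (machines : List String) (hnd : machines.Nodup) (key : String)
    (b : List (List String)) (j : Nat) (hj : j < machines.length) :
    ((PySem.List.sorted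
        ((PySem.List.pyRange 0 (PySem.Str.len key + 1) 1).foldl
          (fun m start => PySem.Set.update m (pvMatchFrom (pvTrieOf machines) (key.toList.drop start.toNat)))
          PySem.Set.empty) (fun x => x) false).foldl
        (fun b i => b.modify i (· ++ [key])) b)[j]? =
      if PySem.Str.isIn (machines.getD j "") key then b[j]?.map (· ++ [key]) else b[j]? := by
  have hsorted : (PySem.List.sorted
        ((PySem.List.pyRange 0 (PySem.Str.len key + 1) 1).foldl
          (fun m start => PySem.Set.update m (pvMatchFrom (pvTrieOf machines) (key.toList.drop start.toNat)))
          PySem.Set.empty) (fun x => x) false) =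
      (List.range machines.length).filter (fun i => PySem.Str.isIn (machines.getD i "") key) :=
    pv_sorted_eq_filter_range _ (pv_nodup_foldl_update _ _ _ List.nodup_nil) _ _
      (fun i => pv_matched_mem machines hnd key i)
  rw [hsorted, pv_foldl_modify_getElem? _ (List.Nodup.filter _ List.nodup_range) b _ j]
  by_cases hp : PySem.Str.isIn (machines.getD j "") key
  · rw [if_pos (List.mem_filter.mpr ⟨List.mem_range.mpr hj, hp⟩), if_pos hp]
  · have hnotmem : j ∉ List.filter (fun i => PySem.Str.isIn (machines.getD i "") key) (List.range machines.length) :=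
      fun hmem => hp (List.mem_filter.mp hmem).2
    rw [if_neg hnotmem, if_neg hp]

theorem pv_step_length (machines : List String) (key : String) (b : List (List String)) :
    ((PySem.List.sorted
        ((PySem.List.pyRange 0 (PySem.Str.len key + 1) 1).foldl
          (fun m start => PySem.Set.update m (pvMatchFrom (pvTrieOf machines) (key.toList.drop start.toNat)))
          PySem.Set.empty) (fun x => x) false).foldl
        (fun b i => b.modify i (· ++ [key])) b).length = b.length :=
  pv_foldl_modify_length _ _ _

theorem pv_buckets_getElem? (machines : List String) (hnd : machines.Nodup) (ks : List String)
    (b : List (List String)) (j : Nat) (hj : j < machines.length) :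
    (ks.foldl (fun b key =>
        (PySem.List.sorted
          ((PySem.List.pyRange 0 (PySem.Str.len key + 1) 1).foldl
            (fun m start => PySem.Set.update m (pvMatchFrom (pvTrieOf machines) (key.toList.drop start.toNat)))
            PySem.Set.empty) (fun x => x) false).foldl
          (fun b i => b.modify i (· ++ [key])) b) b)[j]? =
      b[j]?.map (· ++ ks.filter (fun k => PySem.Str.isIn (machines.getD j "") k)) := by
  induction ks generalizing b with
  | nil =>
    simp only [List.foldl_nil, List.filter_nil]
    cases b[j]? <;> simp
  | cons k ks ih =>
    simp only [List.foldl_cons]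
    rw [ih, pv_step_getElem? machines hnd k b j hj, List.filter_cons]
    by_cases hp : PySem.Str.isIn (machines.getD j "") k
    · rw [if_pos hp, if_pos hp]
      cases b[j]? <;> simp
    · rw [if_neg hp, if_neg hp]

theorem pv_buckets_length (machines : List String) (ks : List String) (b : List (List String)) :
    (ks.foldl (fun b key =>
        (PySem.List.sorted
          ((PySem.List.pyRange 0 (PySem.Str.len key + 1) 1).foldl
            (fun m start => PySem.Set.update m (pvMatchFrom (pvTrieOf machines) (key.toList.drop start.toNat)))
            PySem.Set.empty) (fun x => x) false).foldl
          (fun b i => b.modify i (· ++ [key])) b) b).length = b.length := by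
  induction ks generalizing b with
  | nil => rfl
  | cons k ks ih => rw [List.foldl_cons, ih, pv_step_length]

theorem pv_B_eq_canonical (machines ks : List String) (hnd : machines.Nodup) :
    ((machines.zip
        (ks.foldl (fun b key =>
          (PySem.List.sorted
            ((PySem.List.pyRange 0 (PySem.Str.len key + 1) 1).foldl
              (fun m start => PySem.Set.update m (pvMatchFrom (pvTrieOf machines) (key.toList.drop start.toNat)))
              PySem.Set.empty) (fun x => x) false).foldl
            (fun b i => b.modify i (· ++ [key])) b)
          (machines.map (fun _ => ([] : List String))))).foldl
        (fun d p => d.insert p.1 p.2) PySem.Dict.empty).items =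
      machines.map (fun m => (m, ks.filter (fun k => PySem.Str.isIn m k))) := by
  set b0 : List (List String) := machines.map (fun _ => ([] : List String)) with hb0
  set buckets := ks.foldl (fun b key =>
          (PySem.List.sorted
            ((PySem.List.pyRange 0 (PySem.Str.len key + 1) 1).foldl
              (fun m start => PySem.Set.update m (pvMatchFrom (pvTrieOf machines) (key.toList.drop start.toNat)))
              PySem.Set.empty) (fun x => x) false).foldl
            (fun b i => b.modify i (· ++ [key])) b) b0 with hbuckets
  have hblen : buckets.length = machines.length := by
    rw [hbuckets, pv_buckets_length, hb0, List.length_map]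
  have hzip : machines.zip buckets = machines.map (fun m => (m, ks.filter (fun k => PySem.Str.isIn m k))) := by
    apply List.ext_getElem
    · rw [List.length_zip, hblen, List.length_map, Nat.min_self]
    · intro i h1 h2
      have hi : i < machines.length := by
        rw [List.length_zip, hblen, Nat.min_self] at h1; exact h1
      have hb0i : b0[i]? = some [] := by
        rw [hb0, List.getElem?_map, List.getElem?_eq_getElem hi]
        rfl
      have hbi? : buckets[i]? = some (ks.filter (fun k => PySem.Str.isIn (machines.getD i "") k)) := by
        rw [hbuckets, pv_buckets_getElem? machines hnd ks b0 i hi, hb0i]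
        rfl
      obtain ⟨hlt, hbi⟩ := List.getElem?_eq_some_iff.mp hbi?
      rw [List.getElem_zip, List.getElem_map, hbi,
          List.getD_eq_getElem machines "" hi]
  rw [hzip]
  rw [PySem.Dict.items_foldl_insert_fresh _ _ _ _ (fun a _ => PySem.Dict.contains_empty _)
        (by simpa [Function.comp_def] using hnd)]
  simp [Function.comp_def, PySem.Dict.empty]

theorem pv_machines_nodup (xs : List String) :
    (PySem.List.sorted (PySem.Set.ofList xs) (fun x => x) false).Nodup :=
  (PySem.List.sorted_perm (PySem.Set.ofList xs) (fun x => x) false).symm.nodup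
    (PySem.Set.nodup_ofList xs)

-- ===== VERDICT (by name: the statement is the Claim_ definition above) =====
theorem get_machine_issues_spec : Claim_equal_get_machine_issues := by
  intro all_machines_in_pipes issues_dict _
  unfold Spec_get_machine_issues get_machine_issues get_machine_issues_alt
  have hnd := pv_machines_nodup all_machines_in_pipes
  rw [pv_A_eq_canonical _ _ hnd, pv_B_eq_canonical _ _ hnd]
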